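-- pv_equiv track=rewrite | github.com/rwt-9829/who-is-whale | parser/log_parser.py | extract_street_actions
-- ===== SOURCE A (Python) =====
-- def extract_street_actions(hand):
--     streets = {"PREFLOP": [], "FLOP": [], "TURN": [], "RIVER": []}
--     current_street = "PREFLOP"
--     for entry in hand:
--         if entry.startswith("Flop:"):
--             current_street = "FLOP"
--         elif entry.startswith("Turn:"):
--             current_street = "TURN"
--         elif entry.startswith("River:"):
--             current_street = "RIVER"
--         elif '"' in entry and any(kw in entry for kw in ["bets", "calls", "raises", "folds", "checks", "posts"]):
--             streets[current_street].append(entry)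
--     return streets
-- ===== SOURCE B (Python) =====
-- HEADERS = (("Flop:", "FLOP"), ("Turn:", "TURN"), ("River:", "RIVER"))
-- KEYWORDS = ("bets", "calls", "raises", "folds", "checks", "posts")
--
--
-- def _is_action(entry):
--     return '"' in entry and any(kw in entry for kw in KEYWORDS)
--
--
-- def extract_street_actions(hand):
--     # Pass 1: label every entry with the street of its most recent preceding
--     # header (None for header lines themselves).
--     labels = []
--     street = "PREFLOP"
--     for entry in hand:
--         hdr = next((s for p, s in HEADERS if entry.startswith(p)), None)
--         if hdr is not None:
--             street = hdr
--             labels.append(None)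
--         else:
--             labels.append(street)
--     # Pass 2: build the dict key by key, filtering the labelled entries.
--     return {
--         s: [e for e, lab in zip(hand, labels) if lab == s and _is_action(e)]
--         for s in ("PREFLOP", "FLOP", "TURN", "RIVER")
--     }
-- ===== Notes on version B (the rewrite author's own statement) =====
-- stated objective: alternative
-- what changed: A threads one mutable dict through a single loop, appending to the current street's bucket; B first computes a per-entry street label in one labelling pass, then builds the dict key by key with a filter comprehension over the labelled entries.
import Mathlib
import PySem

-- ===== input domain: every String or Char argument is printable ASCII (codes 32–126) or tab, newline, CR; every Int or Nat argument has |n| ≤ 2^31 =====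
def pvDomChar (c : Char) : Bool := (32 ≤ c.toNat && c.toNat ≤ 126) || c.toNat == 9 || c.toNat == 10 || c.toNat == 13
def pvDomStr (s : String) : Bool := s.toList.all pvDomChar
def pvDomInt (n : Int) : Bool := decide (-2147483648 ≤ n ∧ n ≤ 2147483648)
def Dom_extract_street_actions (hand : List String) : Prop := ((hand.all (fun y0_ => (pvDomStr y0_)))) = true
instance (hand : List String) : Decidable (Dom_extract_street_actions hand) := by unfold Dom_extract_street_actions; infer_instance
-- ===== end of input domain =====

-- B restructures A (one loop threading a mutable dict) into a labelling pass plus per-key filters; same values, no speed claim.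

-- ===== PORT A =====
-- '"' in entry and any(kw in entry for kw in [...])
def pvIsAction (entry : String) : Bool :=
  PySem.Str.isIn "\"" entry &&
    (["bets", "calls", "raises", "folds", "checks", "posts"].any (fun kw => PySem.Str.isIn kw entry))

def pvStepA (st : PySem.Dict String (List String) × String) (entry : String) :
    PySem.Dict String (List String) × String :=
  if PySem.Str.startswith entry "Flop:" then (st.1, "FLOP")
  else if PySem.Str.startswith entry "Turn:" then (st.1, "TURN")
  else if PySem.Str.startswith entry "River:" then (st.1, "RIVER")
  else if pvIsAction entry then (st.1.modify st.2 [] (· ++ [entry]), st.2)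
  else st

def extract_street_actions (hand : List String) : List (String × List String) :=
  (hand.foldl pvStepA
      (PySem.Dict.ofList [("PREFLOP", []), ("FLOP", []), ("TURN", []), ("RIVER", [])],
       "PREFLOP")).1.items

-- ===== PORT B =====
def pvHeaders : List (String × String) := [("Flop:", "FLOP"), ("Turn:", "TURN"), ("River:", "RIVER")]

-- next((s for p, s in HEADERS if entry.startswith(p)), None)
def pvHeaderOf (entry : String) : Option String :=
  pvHeaders.findSome? (fun ps => if PySem.Str.startswith entry ps.1 then some ps.2 else none)

def pvLabelStep (st : List (Option String) × String) (entry : String) :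
    List (Option String) × String :=
  match pvHeaderOf entry with
  | some h => (st.1 ++ [none], h)
  | none => (st.1 ++ [some st.2], st.2)

def extract_street_actions_alt (hand : List String) : List (String × List String) :=
  let labels := (hand.foldl pvLabelStep ([], "PREFLOP")).1
  ["PREFLOP", "FLOP", "TURN", "RIVER"].map (fun s =>
    (s, ((hand.zip labels).filter (fun el => el.2 == some s && pvIsAction el.1)).map (·.1)))

-- ===== PRECONDITION & SPEC =====
def Spec_extract_street_actions (hand : List String) (out : List (String × List String)) : Prop := out = extract_street_actions_alt hand
instance (hand : List String) (out : List (String × List String)) : Decidable (Spec_extract_street_actions hand out) := by unfold Spec_extract_street_actions; infer_instance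

-- ===== CLAIM (what is proved, stated in full; the proofs are below) =====
def Claim_equal_extract_street_actions : Prop := ∀ (hand : List String), Dom_extract_street_actions hand → Spec_extract_street_actions hand (extract_street_actions hand)

-- ===== LEMMAS AND PROOFS =====

-- the street actions of l assigned to bucket `key`, starting from street `st`
def pvActs (st key : String) : List String → List String
  | [] => []
  | e :: r =>
    match pvHeaderOf e with
    | some h => pvActs h key r
    | none =>
      if pvIsAction e then (if st = key then [e] else []) ++ pvActs st key r
      else pvActs st key r

-- the street after processing l, starting from street `st`
def pvFinal (st : String) : List String → String
  | [] => st
  | e :: r =>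
    match pvHeaderOf e with
    | some h => pvFinal h r
    | none => pvFinal st r

-- the per-entry labels of l, starting from street `st`
def pvLab (st : String) : List String → List (Option String)
  | [] => []
  | e :: r =>
    match pvHeaderOf e with
    | some h => none :: pvLab h r
    | none => some st :: pvLab st r

lemma pvHeaderOf_eq (e : String) :
    pvHeaderOf e =
      (if PySem.Str.startswith e "Flop:" then some "FLOP"
       else if PySem.Str.startswith e "Turn:" then some "TURN"
       else if PySem.Str.startswith e "River:" then some "RIVER"
       else none) := by
  simp only [pvHeaderOf, pvHeaders, List.findSome?]
  split_ifs <;> simp_all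

def pvIsStreet (st : String) : Prop :=
  st = "PREFLOP" ∨ st = "FLOP" ∨ st = "TURN" ∨ st = "RIVER"

lemma pvModifyStreet (st : String) (hst : pvIsStreet st) (p f t r : List String) (e : String) :
    (PySem.Dict.mk [("PREFLOP", p), ("FLOP", f), ("TURN", t), ("RIVER", r)]).modify st [] (· ++ [e])
      = PySem.Dict.mk [("PREFLOP", p ++ if st = "PREFLOP" then [e] else []),
          ("FLOP", f ++ if st = "FLOP" then [e] else []),
          ("TURN", t ++ if st = "TURN" then [e] else []),
          ("RIVER", r ++ if st = "RIVER" then [e] else [])] := by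
  rcases hst with h | h | h | h <;> subst h <;>
    simp [PySem.Dict.modify, PySem.Dict.getD, PySem.Dict.get?, PySem.Dict.insert, PySem.Dict.contains]

lemma pvLoopA (l : List String) : ∀ (st : String) (p f t r : List String), pvIsStreet st →
    l.foldl pvStepA (PySem.Dict.mk [("PREFLOP", p), ("FLOP", f), ("TURN", t), ("RIVER", r)], st)
      = (PySem.Dict.mk [("PREFLOP", p ++ pvActs st "PREFLOP" l), ("FLOP", f ++ pvActs st "FLOP" l),
          ("TURN", t ++ pvActs st "TURN" l), ("RIVER", r ++ pvActs st "RIVER" l)], pvFinal st l) := by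
  induction l with
  | nil => intro st p f t r _; simp [pvActs, pvFinal]
  | cons e rest ih =>
    intro st p f t r hst
    have hh := pvHeaderOf_eq e
    by_cases h1 : PySem.Str.startswith e "Flop:"
    · simp only [h1, if_true] at hh
      simp only [List.foldl_cons, pvStepA, h1, if_true]
      rw [ih "FLOP" p f t r (by simp [pvIsStreet])]
      simp [pvActs, pvFinal, hh]
    · by_cases h2 : PySem.Str.startswith e "Turn:"
      · simp only [h1, h2, Bool.false_eq_true, if_false, if_true] at hh
        simp only [List.foldl_cons, pvStepA, h1, h2, Bool.false_eq_true, if_false, if_true]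
        rw [ih "TURN" p f t r (by simp [pvIsStreet])]
        simp [pvActs, pvFinal, hh]
      · by_cases h3 : PySem.Str.startswith e "River:"
        · simp only [h1, h2, h3, Bool.false_eq_true, if_false, if_true] at hh
          simp only [List.foldl_cons, pvStepA, h1, h2, h3, Bool.false_eq_true, if_false, if_true]
          rw [ih "RIVER" p f t r (by simp [pvIsStreet])]
          simp [pvActs, pvFinal, hh]
        · simp only [h1, h2, h3] at hh
          by_cases ha : pvIsAction e
          · simp only [List.foldl_cons, pvStepA, h1, h2, h3, ha, Bool.false_eq_true, if_false, if_true]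
            rw [pvModifyStreet st hst p f t r e, ih st _ _ _ _ hst]
            simp [pvActs, pvFinal, hh, ha, List.append_assoc]
          · simp only [List.foldl_cons, pvStepA, h1, h2, h3, ha, Bool.false_eq_true, if_false]
            rw [ih st p f t r hst]
            simp [pvActs, pvFinal, hh, ha]

lemma pvLoopB (l : List String) : ∀ (st : String) (acc : List (Option String)),
    l.foldl pvLabelStep (acc, st) = (acc ++ pvLab st l, pvFinal st l) := by
  induction l with
  | nil => intro st acc; simp [pvLab, pvFinal]
  | cons e rest ih =>
    intro st acc
    cases h : pvHeaderOf e with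
    | some hd => simp [pvLabelStep, h, pvLab, pvFinal, ih]
    | none => simp [pvLabelStep, h, pvLab, pvFinal, ih]

lemma pvFilterB (l : List String) : ∀ (st key : String),
    ((l.zip (pvLab st l)).filter (fun el => el.2 == some key && pvIsAction el.1)).map (·.1)
      = pvActs st key l := by
  induction l with
  | nil => intro st key; simp [pvLab, pvActs]
  | cons e rest ih =>
    intro st key
    cases h : pvHeaderOf e with
    | some hd => simp [pvLab, pvActs, h, ih]
    | none =>
      by_cases ha : pvIsAction e
      · by_cases hk : st = key <;> simp [pvLab, pvActs, h, ha, hk, ih]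
      · simp [pvLab, pvActs, h, ha, ih]

-- ===== VERDICT (by name: the statement is the Claim_ definition above) =====
theorem extract_street_actions_spec : Claim_equal_extract_street_actions := by
  intro hand _
  unfold Spec_extract_street_actions extract_street_actions extract_street_actions_alt
  rw [show (PySem.Dict.ofList [("PREFLOP", ([] : List String)), ("FLOP", []), ("TURN", []), ("RIVER", [])])
      = PySem.Dict.mk [("PREFLOP", []), ("FLOP", []), ("TURN", []), ("RIVER", [])] from by decide]
  rw [pvLoopA hand "PREFLOP" [] [] [] [] (Or.inl rfl), pvLoopB hand "PREFLOP" []]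
  simp [pvFilterB]
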